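-- pv_equiv track=rewrite | github.com/seligman/aoc | 2020/Helpers/day_06.py | calc
-- ===== SOURCE A (Python) =====
-- from collections import defaultdict
--
-- def calc(log, values, mode):
--     total_answers = 0
--     this_group = defaultdict(int)
--     for value in values + [""]:
--         if len(value) == 0:
--             if len(this_group) > 0:
--                 if mode == 1:
--                     total_answers += len(this_group) - 1
--                 else:
--                     total_answers += len([x for x in this_group if this_group[x] == this_group['people']]) - 1
--                 this_group = defaultdict(int)
--         else:
--             for answer in value:
--                 this_group[answer] += 1
--             this_group['people'] += 1
--
--     return total_answers
-- ===== SOURCE B (Python) =====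
-- from collections import Counter
--
-- def calc(log, values, mode):
--     # Phase 1: partition into groups of consecutive non-empty lines.
--     groups = []
--     cur = []
--     for value in values:
--         if value:
--             cur.append(value)
--         else:
--             if cur:
--                 groups.append(cur)
--             cur = []
--     if cur:
--         groups.append(cur)
--     # Phase 2: score each group.
--     total = 0
--     for group in groups:
--         if mode == 1:
--             total += len(set().union(*(set(p) for p in group)))
--         else:
--             cnt = Counter()
--             for p in group:
--                 cnt.update(p)
--             total += sum(1 for c in cnt.values() if c == len(group))
--     return total
-- ===== Notes on version B (the rewrite author's own statement) =====
-- stated objective: alternative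
-- what changed: Replaces A's single pass over a counting dict with a 'people' sentinel key by two-phase grouping (partition lines into groups) followed by per-group scoring with a set union (mode 1) or a character Counter (other modes).
import Mathlib
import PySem

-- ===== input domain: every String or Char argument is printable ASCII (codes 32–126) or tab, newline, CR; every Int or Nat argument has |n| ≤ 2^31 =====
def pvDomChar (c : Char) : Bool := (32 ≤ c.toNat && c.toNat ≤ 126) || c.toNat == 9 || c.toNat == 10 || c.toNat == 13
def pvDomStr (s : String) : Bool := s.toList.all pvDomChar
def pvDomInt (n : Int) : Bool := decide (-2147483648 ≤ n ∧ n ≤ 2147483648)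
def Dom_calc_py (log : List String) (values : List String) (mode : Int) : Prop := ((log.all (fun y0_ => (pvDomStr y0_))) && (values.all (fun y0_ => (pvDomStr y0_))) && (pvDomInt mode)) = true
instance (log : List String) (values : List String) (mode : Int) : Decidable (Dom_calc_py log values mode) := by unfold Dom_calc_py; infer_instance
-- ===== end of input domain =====

-- B replaces A's single pass over a counting dict with a 'people' sentinel key by two-phase
-- grouping plus per-group scoring (set union for mode 1, a character counter otherwise); same cost.


-- ===== PORT A =====
-- iterating a Python string yields its characters as one-character strings:
def pvSing (c : Char) : String := String.ofList [c]

-- the body of A's else-branch: count each answer, then bump the 'people' sentinel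
def pvLineStep (g : PySem.Dict String Int) (value : String) : PySem.Dict String Int :=
  let g := (value.toList.map pvSing).foldl (fun g a => g.insert a (g.getD a 0 + 1)) g
  g.insert "people" (g.getD "people" 0 + 1)

-- A's flush of a non-empty group
def pvFlush (mode : Int) (g : PySem.Dict String Int) : Int :=
  if mode = 1 then (g.size : Int) - 1
  else ((g.keys.filter (fun x => g.getD x 0 == g.getD "people" 0)).length : Int) - 1

def pvStepA (mode : Int) (st : Int × PySem.Dict String Int) (value : String) : Int × PySem.Dict String Int :=
  if PySem.Str.len value = 0 then
    if st.2.size > 0 then (st.1 + pvFlush mode st.2, PySem.Dict.empty) else st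
  else (st.1, pvLineStep st.2 value)

def calc_py (log : List String) (values : List String) (mode : Int) : Int :=
  ((values ++ [""]).foldl (pvStepA mode) (0, PySem.Dict.empty)).1

-- ===== PORT B =====
-- phase 1: partition the lines into groups of consecutive non-empty lines
def pvStep1 (st : List (List String) × List String) (value : String) : List (List String) × List String :=
  if ¬ (value.toList = []) then (st.1, st.2 ++ [value])
  else if ¬ (st.2 = []) then (st.1 ++ [st.2], []) else (st.1, [])

-- set().union(*(set(p) for p in group))
def pvUnionSet (group : List String) : PySem.Set Char :=
  group.foldl (fun s p => PySem.Set.union s (PySem.Set.ofList p.toList)) PySem.Set.empty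

-- cnt = Counter(); for p in group: cnt.update(p)
def pvCounter (group : List String) : PySem.Dict Char Int :=
  group.foldl (fun cnt p => p.toList.foldl (fun cnt ch => cnt.modify ch 0 (· + 1)) cnt) PySem.Dict.empty

-- phase 2: score one group
def pvGroupScore (mode : Int) (group : List String) : Int :=
  if mode = 1 then ((pvUnionSet group).length : Int)
  else (((pvCounter group).values.filter (fun c => c == (group.length : Int))).length : Int)

def calc_py_alt (log : List String) (values : List String) (mode : Int) : Int :=
  let st := values.foldl pvStep1 ([], [])
  let groups := if ¬ (st.2 = []) then st.1 ++ [st.2] else st.1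
  groups.foldl (fun total g => total + pvGroupScore mode g) 0

-- ===== PRECONDITION & SPEC =====
def Spec_calc_py (log : List String) (values : List String) (mode : Int) (out : Int) : Prop := out = calc_py_alt log values mode
instance (log : List String) (values : List String) (mode : Int) (out : Int) : Decidable (Spec_calc_py log values mode out) := by unfold Spec_calc_py; infer_instance

-- ===== CLAIM (what is proved, stated in full; the proofs are below) =====
def Claim_equal_calc_py : Prop := ∀ (log : List String) (values : List String) (mode : Int), Dom_calc_py log values mode → Spec_calc_py log values mode (calc_py log values mode)

-- ===== LEMMAS AND PROOFS =====

-- the groups of non-empty lines a pending group `cur` followed by `values` produces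
def pvGroupsOf : List String → List String → List (List String)
  | [], cur => if cur = [] then [] else [cur]
  | v :: vs, cur =>
    if v.toList = [] then
      if cur = [] then pvGroupsOf vs [] else cur :: pvGroupsOf vs []
    else pvGroupsOf vs (cur ++ [v])

-- the keys A inserts while processing line v, in order
def pvKeyline (v : String) : List String := v.toList.map pvSing ++ ["people"]
def pvStream (cur : List String) : List String := (cur.map pvKeyline).flatten
def pvAllChars (cur : List String) : List Char := (cur.map String.toList).flatten
def pvDictOf (cur : List String) : PySem.Dict String Int := cur.foldl pvLineStep PySem.Dict.empty

theorem pvSing_inj : Function.Injective pvSing := by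
  intro a b h
  have h2 := congrArg String.toList h
  simp [pvSing] at h2
  exact h2

theorem pvSing_ne_people (c : Char) : pvSing c ≠ "people" := by
  intro h
  have h2 := congrArg String.toList h
  have h3 : "people".toList = ['p','e','o','p','l','e'] := by decide
  rw [h3] at h2
  simp [pvSing] at h2

theorem pvStream_cons (v : String) (vs : List String) :
    pvStream (v :: vs) = pvKeyline v ++ pvStream vs := by
  simp [pvStream]

theorem pvAllChars_cons (v : String) (vs : List String) :
    pvAllChars (v :: vs) = v.toList ++ pvAllChars vs := by
  simp [pvAllChars]

theorem pvLineStep_eq (d : PySem.Dict String Int) (v : String) :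
    pvLineStep d v = (pvKeyline v).foldl (fun d x => d.insert x (d.getD x 0 + 1)) d := by
  simp [pvLineStep, pvKeyline, List.foldl_append]

theorem pvDictOf_eq_counter (cur : List String) :
    pvDictOf cur = PySem.Dict.counter (pvStream cur) := by
  rw [← PySem.Dict.foldl_insert_getD_add_one_eq_counter]
  show pvDictOf cur = _
  unfold pvDictOf
  generalize (PySem.Dict.empty : PySem.Dict String Int) = d
  induction cur generalizing d with
  | nil => rfl
  | cons v vs ih =>
    rw [pvStream_cons, List.foldl_append, List.foldl_cons, ← pvLineStep_eq, ih]

theorem pvCount_stream_people (cur : List String) :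
    (pvStream cur).count "people" = cur.length := by
  induction cur with
  | nil => rfl
  | cons v vs ih =>
    rw [pvStream_cons, List.count_append, ih]
    have h0 : (v.toList.map pvSing).count "people" = 0 :=
      List.count_eq_zero_of_not_mem (by
        intro hmem
        obtain ⟨c, _, hc⟩ := List.mem_map.mp hmem
        exact pvSing_ne_people c hc)
    simp [pvKeyline, List.count_append, h0, Nat.add_comm]

theorem pvCount_stream_sing (cur : List String) (c : Char) :
    (pvStream cur).count (pvSing c) = (pvAllChars cur).count c := by
  induction cur with
  | nil => rfl
  | cons v vs ih =>
    rw [pvStream_cons, pvAllChars_cons, List.count_append, List.count_append, ih]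
    have h1 : (v.toList.map pvSing).count (pvSing c) = v.toList.count c :=
      List.count_map_of_injective _ _ pvSing_inj _
    have h2 : (["people"] : List String).count (pvSing c) = 0 :=
      List.count_eq_zero_of_not_mem (by simp [pvSing_ne_people c])
    simp [pvKeyline, List.count_append, h1, h2]

theorem pvMem_stream (cur : List String) (x : String) :
    x ∈ pvStream cur ↔ ((cur ≠ [] ∧ x = "people") ∨ ∃ c ∈ pvAllChars cur, x = pvSing c) := by
  induction cur with
  | nil => simp [pvStream, pvAllChars]
  | cons v vs ih =>
    rw [pvStream_cons, List.mem_append, ih, pvAllChars_cons]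
    simp only [pvKeyline, List.mem_append, List.mem_map, List.mem_singleton]
    constructor
    · rintro ((⟨c, hc, rfl⟩ | rfl) | (⟨_, rfl⟩ | ⟨c, hc, rfl⟩))
      · exact Or.inr ⟨c, Or.inl hc, rfl⟩
      · exact Or.inl ⟨by simp, rfl⟩
      · exact Or.inl ⟨by simp, rfl⟩
      · exact Or.inr ⟨c, Or.inr hc, rfl⟩
    · rintro (⟨_, rfl⟩ | ⟨c, hc | hc, rfl⟩)
      · exact Or.inl (Or.inr rfl)
      · exact Or.inl (Or.inl ⟨c, hc, rfl⟩)
      · exact Or.inr (Or.inr ⟨c, hc, rfl⟩)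

theorem pvMem_unionSet (group : List String) (c : Char) :
    c ∈ pvUnionSet group ↔ c ∈ pvAllChars group := by
  unfold pvUnionSet
  rw [show (PySem.Set.empty : PySem.Set Char) = ([] : List Char) from rfl]
  generalize hgen : ([] : List Char) = s
  have : c ∈ group.foldl (fun s p => PySem.Set.union s (PySem.Set.ofList p.toList)) s ↔
      c ∈ s ∨ c ∈ pvAllChars group := by
    clear hgen
    induction group generalizing s with
    | nil => simp [pvAllChars]
    | cons v vs ih =>
      rw [List.foldl_cons, ih, pvAllChars_cons]
      simp [PySem.Set.mem_union, PySem.Set.mem_ofList, or_assoc]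
  rw [this, ← hgen]
  simp

theorem pvNodup_unionSet (group : List String) : (pvUnionSet group).Nodup := by
  unfold pvUnionSet
  have : ∀ s : PySem.Set Char, s.Nodup →
      (group.foldl (fun s p => PySem.Set.union s (PySem.Set.ofList p.toList)) s).Nodup := by
    induction group with
    | nil => intro s hs; exact hs
    | cons v vs ih =>
      intro s hs
      exact ih _ (PySem.Set.nodup_union _ _ hs)
  exact this _ (by simp [PySem.Set.empty])

theorem pvPerm_union (group : List String) :
    (pvUnionSet group).Perm (PySem.Set.ofList (pvAllChars group)) := by
  rw [List.perm_ext_iff_of_nodup (pvNodup_unionSet group) (PySem.Set.nodup_ofList _)]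
  intro c
  rw [pvMem_unionSet, PySem.Set.mem_ofList]

theorem pvPerm_stream (cur : List String) (h : cur ≠ []) :
    (PySem.Set.ofList (pvStream cur)).Perm
      ("people" :: (PySem.Set.ofList (pvAllChars cur)).map pvSing) := by
  have hnd : ("people" :: (PySem.Set.ofList (pvAllChars cur)).map pvSing).Nodup := by
    refine List.nodup_cons.mpr ⟨?_, ?_⟩
    · intro hmem
      obtain ⟨c, _, hc⟩ := List.mem_map.mp hmem
      exact pvSing_ne_people c hc
    · exact (PySem.Set.nodup_ofList _).map pvSing_inj
  rw [List.perm_ext_iff_of_nodup (PySem.Set.nodup_ofList _) hnd]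
  intro x
  rw [PySem.Set.mem_ofList, pvMem_stream]
  simp only [List.mem_cons, List.mem_map, PySem.Set.mem_ofList]
  constructor
  · rintro (⟨_, rfl⟩ | ⟨c, hc, rfl⟩)
    · exact Or.inl rfl
    · exact Or.inr ⟨c, hc, rfl⟩
  · rintro (rfl | ⟨c, hc, rfl⟩)
    · exact Or.inl ⟨h, rfl⟩
    · exact Or.inr ⟨c, hc, rfl⟩

theorem pvCounter_eq_counter (group : List String) :
    pvCounter group = PySem.Dict.counter (pvAllChars group) := by
  rw [PySem.Dict.counter_eq_foldl]
  unfold pvCounter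
  generalize (PySem.Dict.empty : PySem.Dict Char Int) = d
  induction group generalizing d with
  | nil => rfl
  | cons v vs ih =>
    rw [pvAllChars_cons, List.foldl_append, List.foldl_cons, ih]

theorem pvSize_dictOf (cur : List String) :
    (pvDictOf cur).size = (PySem.Set.ofList (pvStream cur)).length := by
  rw [pvDictOf_eq_counter]
  show (PySem.Dict.counter (pvStream cur)).items.length = _
  rw [PySem.Dict.items_counter]
  simp

theorem pvSize_dictOf_pos (cur : List String) (h : cur ≠ []) :
    0 < (pvDictOf cur).size := by
  rw [pvSize_dictOf]
  apply List.length_pos_of_mem (a := "people")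
  rw [PySem.Set.mem_ofList, pvMem_stream]
  exact Or.inl ⟨h, rfl⟩

-- the central fact: flushing A's dict for a non-empty group scores exactly as B scores the group
theorem pvFlush_eq (mode : Int) (cur : List String) (h : cur ≠ []) :
    pvFlush mode (pvDictOf cur) = pvGroupScore mode cur := by
  unfold pvFlush pvGroupScore
  by_cases hm : mode = 1
  · simp only [hm]
    rw [pvSize_dictOf, (pvPerm_stream cur h).length_eq, (pvPerm_union cur).length_eq]
    simp
  · simp only [if_neg hm]
    rw [pvDictOf_eq_counter]
    have hkeys : (PySem.Dict.counter (pvStream cur)).keys = PySem.Set.ofList (pvStream cur) :=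
      PySem.Dict.keys_counter _
    have hcnt : ∀ x, (PySem.Dict.counter (pvStream cur)).getD x 0 = ((pvStream cur).count x : Int) :=
      fun x => PySem.Dict.getD_counter _ _
    have hA : ((PySem.Dict.counter (pvStream cur)).keys.filter
        (fun x => (PySem.Dict.counter (pvStream cur)).getD x 0 ==
          (PySem.Dict.counter (pvStream cur)).getD "people" 0)).length
        = 1 + (PySem.Set.ofList (pvAllChars cur)).countP
            (fun c => ((pvAllChars cur).count c : Int) == (cur.length : Int)) := by
      rw [hkeys, ← List.countP_eq_length_filter]
      simp only [hcnt, pvCount_stream_people]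
      rw [(pvPerm_stream cur h).countP_eq, List.countP_cons, List.countP_map]
      simp only [Function.comp_def, pvCount_stream_sing]
      simp [Nat.add_comm, pvCount_stream_people]
    rw [hA]
    have hB : ((pvCounter cur).values.filter (fun c => c == (cur.length : Int))).length
        = (PySem.Set.ofList (pvAllChars cur)).countP
            (fun c => ((pvAllChars cur).count c : Int) == (cur.length : Int)) := by
      rw [pvCounter_eq_counter]
      have hv : (PySem.Dict.counter (pvAllChars cur)).values
          = ((PySem.Dict.counter (pvAllChars cur)).items).map (·.2) := rfl
      rw [hv, PySem.Dict.items_counter]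
      rw [List.map_map, ← List.countP_eq_length_filter, List.countP_map]
      rfl
    rw [hB]
    push_cast
    ring

theorem pvDictOf_append (cur : List String) (v : String) :
    pvDictOf (cur ++ [v]) = pvLineStep (pvDictOf cur) v := by
  unfold pvDictOf
  rw [List.foldl_append, List.foldl_cons, List.foldl_nil]

theorem pvStrLen_eq_zero (v : String) : (PySem.Str.len v = 0) ↔ v.toList = [] := by
  simp [PySem.Str.len_eq]

-- A's loop, started with the dict of a pending group, totals the scores of the remaining groups
theorem pvALoop (mode : Int) (values : List String) :
    ∀ (cur : List String) (t : Int),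
      ((values ++ [""]).foldl (pvStepA mode) (t, pvDictOf cur)).1
        = t + ((pvGroupsOf values cur).map (pvGroupScore mode)).sum := by
  induction values with
  | nil =>
    intro cur t
    simp only [List.nil_append, List.foldl_cons, List.foldl_nil, pvGroupsOf]
    by_cases h : cur = []
    · subst h
      have hstep : pvStepA mode (t, pvDictOf []) "" = (t, pvDictOf []) := by
        unfold pvStepA
        rw [if_pos (by decide)]
        simp [pvDictOf, PySem.Dict.size_empty]
      rw [hstep]
      simp
    · have hstep : pvStepA mode (t, pvDictOf cur) ""
          = (t + pvFlush mode (pvDictOf cur), PySem.Dict.empty) := by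
        unfold pvStepA
        rw [if_pos (by decide), if_pos (pvSize_dictOf_pos cur h)]
      rw [hstep, if_neg h]
      simp [pvFlush_eq mode cur h]
  | cons v vs ih =>
    intro cur t
    simp only [List.cons_append, List.foldl_cons, pvGroupsOf]
    by_cases hv : v.toList = []
    · have hlen : PySem.Str.len v = 0 := (pvStrLen_eq_zero v).mpr hv
      by_cases h : cur = []
      · have hstep : pvStepA mode (t, pvDictOf cur) v = (t, pvDictOf []) := by
          unfold pvStepA
          rw [if_pos hlen]
          subst h
          simp [pvDictOf, PySem.Dict.size_empty]
        rw [hstep, ih [] t, if_pos hv, if_pos h]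
      · have hstep : pvStepA mode (t, pvDictOf cur) v
            = (t + pvFlush mode (pvDictOf cur), pvDictOf []) := by
          unfold pvStepA
          rw [if_pos hlen, if_pos (pvSize_dictOf_pos cur h)]
          rfl
        rw [hstep, ih [] (t + pvFlush mode (pvDictOf cur)), if_pos hv, if_neg h]
        simp [pvFlush_eq mode cur h]
        ring
    · have hlen : ¬ PySem.Str.len v = 0 := fun hc => hv ((pvStrLen_eq_zero v).mp hc)
      have hstep : pvStepA mode (t, pvDictOf cur) v = (t, pvDictOf (cur ++ [v])) := by
        unfold pvStepA
        rw [if_neg hlen, pvDictOf_append]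
      rw [hstep, ih (cur ++ [v]) t, if_neg hv]

-- B's phase-1 fold produces exactly those groups
theorem pvBGroups (values : List String) :
    ∀ (gs : List (List String)) (cur : List String),
      (if ¬ ((values.foldl pvStep1 (gs, cur)).2 = [])
        then (values.foldl pvStep1 (gs, cur)).1 ++ [(values.foldl pvStep1 (gs, cur)).2]
        else (values.foldl pvStep1 (gs, cur)).1)
      = gs ++ pvGroupsOf values cur := by
  induction values with
  | nil =>
    intro gs cur
    simp only [List.foldl_nil, pvGroupsOf]
    by_cases h : cur = [] <;> simp [h]
  | cons v vs ih =>
    intro gs cur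
    simp only [List.foldl_cons, pvGroupsOf]
    by_cases hv : v.toList = []
    · by_cases h : cur = []
      · have hstep : pvStep1 (gs, cur) v = (gs, []) := by simp [pvStep1, hv, h]
        rw [hstep, ih gs [], if_pos hv, if_pos h]
      · have hstep : pvStep1 (gs, cur) v = (gs ++ [cur], []) := by simp [pvStep1, hv, h]
        rw [hstep, ih (gs ++ [cur]) [], if_pos hv, if_neg h]
        simp
    · have hstep : pvStep1 (gs, cur) v = (gs, cur ++ [v]) := by simp [pvStep1, hv]
      rw [hstep, ih gs (cur ++ [v]), if_neg hv]

theorem pvFoldl_add_score (mode : Int) (gs : List (List String)) :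
    gs.foldl (fun total g => total + pvGroupScore mode g) 0
      = (gs.map (pvGroupScore mode)).sum :=
  by simpa using PySem.List.foldl_add gs (pvGroupScore mode) 0

-- ===== VERDICT (by name: the statement is the Claim_ definition above) =====
theorem calc_py_spec : Claim_equal_calc_py := by
  intro log values mode _
  show calc_py log values mode = calc_py_alt log values mode
  have hA := pvALoop mode values [] 0
  have hB := pvBGroups values [] []
  simp only [pvDictOf, List.foldl_nil] at hA
  simp only [List.nil_append] at hB
  simp only [calc_py, calc_py_alt]
  rw [hA, hB, pvFoldl_add_score]
  simp
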